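-- pv_equiv track=rewrite | github.com/NVIDIA/Megatron-LM | megatron/core/inference/autotune.py | _build_activation_interpolator
-- ===== SOURCE A (Python) =====
-- from typing import Dict, List, Optional, Tuple
--
-- def _build_activation_interpolator(
--     token_counts: List[int], peak_bytes: List[int]
-- ) -> Dict[int, int]:
--     """Deduplicate and build a sorted mapping of token_count → peak_activation_bytes.
--
--     When multiple samples have the same token_count, keep the maximum peak_bytes.
--     """
--     merged: Dict[int, int] = {}
--     for tc, pb in zip(token_counts, peak_bytes):
--         if tc not in merged or pb > merged[tc]:
--             merged[tc] = pb
--     return dict(sorted(merged.items()))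
-- ===== SOURCE B (Python) =====
-- from typing import Dict, List
--
--
-- def _build_activation_interpolator(
--     token_counts: List[int], peak_bytes: List[int]
-- ) -> Dict[int, int]:
--     """Sort the (token_count, peak_bytes) pairs, then one grouped pass:
--     consecutive pairs sharing a token_count are collapsed to their max
--     peak_bytes, emitted in already-sorted order."""
--     pairs = sorted(zip(token_counts, peak_bytes))
--     result: Dict[int, int] = {}
--     i = 0
--     n = len(pairs)
--     while i < n:
--         tc, best = pairs[i]
--         i += 1
--         while i < n and pairs[i][0] == tc:
--             if pairs[i][1] > best:
--                 best = pairs[i][1]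
--             i += 1
--         result[tc] = best
--     return result
-- ===== Notes on version B (the rewrite author's own statement) =====
-- stated objective: alternative
-- what changed: A builds a hash map with a running per-key max and sorts its items at the end; B sorts the zipped (token_count, peak_bytes) pairs first and then makes one linear grouped pass over consecutive equal token_counts taking the max, emitting the result in already-sorted order.
import Mathlib
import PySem

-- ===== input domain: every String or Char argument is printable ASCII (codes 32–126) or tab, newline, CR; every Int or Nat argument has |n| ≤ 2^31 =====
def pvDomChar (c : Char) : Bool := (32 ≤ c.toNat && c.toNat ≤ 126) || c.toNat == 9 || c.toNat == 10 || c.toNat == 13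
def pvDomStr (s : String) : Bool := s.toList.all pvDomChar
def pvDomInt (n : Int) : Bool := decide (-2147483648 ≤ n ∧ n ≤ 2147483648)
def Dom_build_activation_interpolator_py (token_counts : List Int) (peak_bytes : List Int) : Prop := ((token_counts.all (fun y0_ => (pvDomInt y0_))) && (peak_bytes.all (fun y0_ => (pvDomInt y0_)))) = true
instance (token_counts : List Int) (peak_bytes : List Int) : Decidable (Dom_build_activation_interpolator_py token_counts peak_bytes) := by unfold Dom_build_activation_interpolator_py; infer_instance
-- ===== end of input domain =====

-- B replaces A's hash-map-with-running-max-then-sort by sort-the-pairs-then-one-grouped-pass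
-- (consecutive equal token_counts collapsed to their max peak_bytes); alternative decomposition, same result.

-- ===== PORT A =====
-- merged[tc] = pb  when  tc not in merged or pb > merged[tc];  then dict(sorted(merged.items()))
def build_activation_interpolator_py (token_counts : List Int) (peak_bytes : List Int) : List (Int × Int) :=
  let merged : PySem.Dict Int Int :=
    (List.zip token_counts peak_bytes).foldl
      (fun d q =>
        match PySem.Dict.get? d q.1 with
        | none => PySem.Dict.insert d q.1 q.2
        | some v => if q.2 > v then PySem.Dict.insert d q.1 q.2 else d)
      PySem.Dict.empty
  ((PySem.List.sorted2 merged.items Prod.fst Prod.snd).foldl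
      (fun (d : PySem.Dict Int Int) q => PySem.Dict.insert d q.1 q.2) PySem.Dict.empty).items


-- ===== PORT B =====
-- inner while-loop of B: scan the sorted pairs, folding consecutive pairs sharing token_count
-- tc into the running max best, emitting (tc, best) when the group ends
def pvGmGo (tc best : Int) : List (Int × Int) → List (Int × Int)
  | [] => [(tc, best)]
  | q :: rest =>
      if q.1 = tc then pvGmGo tc (if q.2 > best then q.2 else best) rest
      else (tc, best) :: pvGmGo q.1 q.2 rest


def build_activation_interpolator_py_alt (token_counts : List Int) (peak_bytes : List Int) : List (Int × Int) :=
  match PySem.List.sorted2 (List.zip token_counts peak_bytes) Prod.fst Prod.snd with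
  | [] => []
  | q :: rest => pvGmGo q.1 q.2 rest


-- ===== PRECONDITION & SPEC =====
def Spec_build_activation_interpolator_py (token_counts : List Int) (peak_bytes : List Int) (out : List (Int × Int)) : Prop := out = build_activation_interpolator_py_alt token_counts peak_bytes
instance (token_counts : List Int) (peak_bytes : List Int) (out : List (Int × Int)) : Decidable (Spec_build_activation_interpolator_py token_counts peak_bytes out) := by unfold Spec_build_activation_interpolator_py; infer_instance

-- ===== CLAIM (what is proved, stated in full; the proofs are below) =====
def Claim_equal_build_activation_interpolator_py : Prop := ∀ (token_counts : List Int) (peak_bytes : List Int), Dom_build_activation_interpolator_py token_counts peak_bytes → Spec_build_activation_interpolator_py token_counts peak_bytes (build_activation_interpolator_py token_counts peak_bytes)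

-- ===== LEMMAS AND PROOFS =====
def pvM (L : List (Int × Int)) (k : Int) : Option Int :=
  L.foldl
    (fun o q =>
      if q.1 = k then
        some (match o with | none => q.2 | some v => if q.2 > v then q.2 else v)
      else o)
    none

theorem pvM_skip (k : Int) (L : List (Int × Int)) (o : Option Int)
    (h : ∀ q ∈ L, q.1 ≠ k) :
    L.foldl
      (fun o q =>
        if q.1 = k then
          some (match o with | none => q.2 | some v => if q.2 > v then q.2 else v)
        else o) o = o := by
  induction L generalizing o with
  | nil => rfl
  | cons q L ih =>
    simp only [List.foldl_cons]
    rw [if_neg (h q (by simp))]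
    exact ih o (fun r hr => h r (by simp [hr]))

theorem pvM_perm {L L' : List (Int × Int)} (h : L.Perm L') (k : Int) :
    pvM L k = pvM L' k := by
  unfold pvM
  refine @List.Perm.foldl_eq _ _ _ _ _ ⟨?_⟩ h none
  intro o a b
  rcases o with _ | v <;> by_cases ha : a.1 = k <;> by_cases hb : b.1 = k <;>
    simp only [ha, hb, if_pos] <;> split_ifs <;> simp_all <;> omega

theorem pvM_append (L : List (Int × Int)) (q : Int × Int) (k : Int) :
    pvM (L ++ [q]) k =
      (if q.1 = k then
        some (match pvM L k with | none => q.2 | some v => if q.2 > v then q.2 else v)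
      else pvM L k) := by
  simp [pvM, List.foldl_append]

-- ===== A fold invariant =====
def pvInv (d : PySem.Dict Int Int) (L : List (Int × Int)) : Prop :=
  d.keys.Nodup ∧ ∀ k v : Int, ((k, v) ∈ d.items ↔ pvM L k = some v)

theorem pvM_notin {L : List (Int × Int)} {k : Int} (d : PySem.Dict Int Int)
    (hI : pvInv d L) (h : PySem.Dict.get? d k = none) : pvM L k = none := by
  cases hM : pvM L k with
  | none => rfl
  | some v =>
    exfalso
    have hmem : (k, v) ∈ d.items := (hI.2 k v).mpr hM
    have : k ∈ d.keys := PySem.Dict.mem_keys_of_mem_items d hmem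
    exact ((PySem.Dict.get?_eq_none_iff_not_mem_keys d k).mp h) this

theorem pvA_fold (L : List (Int × Int)) :
    ∀ (d : PySem.Dict Int Int) (Lp : List (Int × Int)), pvInv d Lp →
      pvInv (L.foldl
        (fun d q =>
          match PySem.Dict.get? d q.1 with
          | none => PySem.Dict.insert d q.1 q.2
          | some v => if q.2 > v then PySem.Dict.insert d q.1 q.2 else d) d) (Lp ++ L) := by
  induction L with
  | nil => intro d Lp h; simpa using h
  | cons q L ih =>
    intro d Lp h
    have hstep : pvInv
        (match PySem.Dict.get? d q.1 with
          | none => PySem.Dict.insert d q.1 q.2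
          | some v => if q.2 > v then PySem.Dict.insert d q.1 q.2 else d) (Lp ++ [q]) := by
      obtain ⟨o, hg⟩ : ∃ o, PySem.Dict.get? d q.1 = o := ⟨_, rfl⟩
      rw [hg]
      have hmm : ∀ pb : Int,
          (∀ k v : Int, ((k, v) ∈ d.items ↔ pvM Lp k = some v) ) →
          (pvM (Lp ++ [q]) q.1 = some pb) →
          ∀ k v : Int, ((k, v) ∈ (PySem.Dict.insert d q.1 pb).items ↔ pvM (Lp ++ [q]) k = some v) := by
        intro pb hmem hpb k v
        rw [PySem.Dict.mem_items_insert]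
        by_cases hk : k = q.1
        · subst hk
          rw [hpb]
          simp [Prod.ext_iff, eq_comm]
        · have : pvM (Lp ++ [q]) k = pvM Lp k := by
            rw [pvM_append, if_neg (fun hh => hk hh.symm)]
          rw [this, ← hmem k v]
          simp [Prod.ext_iff, hk]
      cases o with
      | none =>
        show pvInv (PySem.Dict.insert d q.1 q.2) (Lp ++ [q])
        have hnone : pvM Lp q.1 = none := pvM_notin d h hg
        refine ⟨PySem.Dict.nodup_keys_insert d q.1 q.2 h.1, hmm q.2 h.2 ?_⟩
        rw [pvM_append, if_pos rfl, hnone]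
      | some v0 =>
        show pvInv (if q.2 > v0 then PySem.Dict.insert d q.1 q.2 else d) (Lp ++ [q])
        have hv0 : pvM Lp q.1 = some v0 := by
          have := (PySem.Dict.get?_eq_some_iff_mem_items d q.1 v0 h.1).mp hg
          exact (h.2 q.1 v0).mp this
        have happ : pvM (Lp ++ [q]) q.1 = some (if q.2 > v0 then q.2 else v0) := by
          rw [pvM_append, if_pos rfl, hv0]
        by_cases hgt : q.2 > v0
        · rw [if_pos hgt]
          refine ⟨PySem.Dict.nodup_keys_insert d q.1 q.2 h.1, hmm q.2 h.2 ?_⟩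
          rw [happ, if_pos hgt]
        · rw [if_neg hgt]
          refine ⟨h.1, ?_⟩
          intro k v
          rw [h.2 k v, pvM_append]
          by_cases hk : q.1 = k
          · subst hk
            rw [if_pos rfl, hv0]
            simp [hgt]
          · rw [if_neg hk]
    have := ih _ (Lp ++ [q]) hstep
    simpa using this

-- ===== sorted2 is pairwise lex-nondecreasing =====
def pvBefore (a b : Int × Int) : Bool :=
  decide (a.1 < b.1) || (!decide (b.1 < a.1) && decide (a.2 < b.2))

theorem pv_sorted2_eq (xs : List (Int × Int)) :
    PySem.List.sorted2 xs Prod.fst Prod.snd =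
      xs.foldl (fun acc x => PySem.List.insertBy pvBefore x acc) [] := rfl

theorem pvBefore_asym {a b : Int × Int} (h : pvBefore a b = true) : pvBefore b a = false := by
  simp [pvBefore] at *; omega

theorem pvBefore_trans1 {x y z : Int × Int} (h1 : pvBefore x y = true)
    (h2 : pvBefore z y = false) : pvBefore z x = false := by
  simp [pvBefore] at *; omega

theorem pv_insertBy_pairwise (x : Int × Int) (acc : List (Int × Int))
    (h : acc.Pairwise (fun a b => pvBefore b a = false)) :
    (PySem.List.insertBy pvBefore x acc).Pairwise (fun a b => pvBefore b a = false) := by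
  induction acc with
  | nil => simp [PySem.List.insertBy]
  | cons y ys ih =>
    rw [List.pairwise_cons] at h
    by_cases hb : pvBefore x y = true
    · show List.Pairwise _ (if pvBefore x y = true then x :: y :: ys else y :: PySem.List.insertBy pvBefore x ys)
      rw [if_pos hb, List.pairwise_cons]
      refine ⟨?_, List.pairwise_cons.mpr h⟩
      intro z hz
      rcases List.mem_cons.mp hz with rfl | hz'
      · exact pvBefore_asym hb
      · exact pvBefore_trans1 hb (h.1 z hz')
    · show List.Pairwise _ (if pvBefore x y = true then x :: y :: ys else y :: PySem.List.insertBy pvBefore x ys)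
      rw [if_neg hb, List.pairwise_cons]
      refine ⟨?_, ih h.2⟩
      intro z hz
      rcases (PySem.List.mem_insertBy pvBefore x z ys).mp hz with rfl | hz'
      · simpa using hb
      · exact h.1 z hz'

theorem pv_sorted2_pairwise (xs : List (Int × Int)) :
    (PySem.List.sorted2 xs Prod.fst Prod.snd).Pairwise (fun a b => a.1 ≤ b.1) := by
  rw [pv_sorted2_eq]
  have main : ∀ (l : List (Int × Int)) (acc : List (Int × Int)),
      acc.Pairwise (fun a b => pvBefore b a = false) →
      (l.foldl (fun acc x => PySem.List.insertBy pvBefore x acc) acc).Pairwise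
        (fun a b => pvBefore b a = false) := by
    intro l
    induction l with
    | nil => intro acc h; simpa using h
    | cons x l ih =>
      intro acc h
      exact ih _ (pv_insertBy_pairwise x acc h)
  refine (main xs [] (by simp)).imp ?_
  intro a b hab
  simp [pvBefore] at hab
  omega

theorem pvGmGo_ge (L : List (Int × Int)) : ∀ (tc best : Int),
    (∀ q ∈ L, tc ≤ q.1) → L.Pairwise (fun a b => a.1 ≤ b.1) →
    ∀ r ∈ pvGmGo tc best L, tc ≤ r.1 := by
  induction L with
  | nil => intro tc best _ _ r hr; simp [pvGmGo] at hr; simp [hr]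
  | cons q L ih =>
    intro tc best h hp r hr
    rw [List.pairwise_cons] at hp
    rw [pvGmGo] at hr
    by_cases hq : q.1 = tc
    · rw [if_pos hq] at hr
      exact ih tc _ (fun s hs => h s (by simp [hs])) hp.2 r hr
    · rw [if_neg hq] at hr
      rcases List.mem_cons.mp hr with rfl | hr'
      · simp
      · have hq1 : tc ≤ q.1 := h q (by simp)
        have := ih q.1 q.2 hp.1 hp.2 r hr'
        omega

theorem pvGmGo_pairwise (L : List (Int × Int)) : ∀ (tc best : Int),
    (∀ q ∈ L, tc ≤ q.1) → L.Pairwise (fun a b => a.1 ≤ b.1) →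
    (pvGmGo tc best L).Pairwise (fun a b : Int × Int => a.1 < b.1) := by
  induction L with
  | nil => intro tc best _ _; simp [pvGmGo]
  | cons q L ih =>
    intro tc best h hp
    rw [List.pairwise_cons] at hp
    rw [pvGmGo]
    by_cases hq : q.1 = tc
    · rw [if_pos hq]
      exact ih tc _ (fun s hs => h s (by simp [hs])) hp.2
    · rw [if_neg hq]
      rw [List.pairwise_cons]
      refine ⟨?_, ih q.1 q.2 hp.1 hp.2⟩
      intro r hr
      have h1 : tc ≤ q.1 := h q (by simp)
      have h2 : q.1 ≤ r.1 := pvGmGo_ge L q.1 q.2 hp.1 hp.2 r hr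
      have : tc ≠ q.1 := fun hh => hq hh.symm
      simp only []
      omega

theorem pvGmGo_mem (L : List (Int × Int)) : ∀ (tc best : Int),
    (∀ q ∈ L, tc ≤ q.1) → L.Pairwise (fun a b => a.1 ≤ b.1) →
    ∀ k v : Int, ((k, v) ∈ pvGmGo tc best L ↔ pvM ((tc, best) :: L) k = some v) := by
  induction L with
  | nil =>
    intro tc best _ _ k v
    simp [pvGmGo, pvM, Prod.ext_iff]
    by_cases hk : tc = k
    · subst hk; simp [eq_comm]
    · simp [hk]; exact fun h => absurd h.symm hk
  | cons q L ih =>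
    intro tc best h hp k v
    rw [List.pairwise_cons] at hp
    rw [pvGmGo]
    by_cases hq : q.1 = tc
    · rw [if_pos hq]
      rw [ih tc _ (fun s hs => h s (by simp [hs])) hp.2 k v]
      constructor <;> intro hh
      · rw [show pvM ((tc, best) :: q :: L) k =
            pvM ((tc, if q.2 > best then q.2 else best) :: L) k from ?_]
        · exact hh
        · simp only [pvM, List.foldl_cons, hq]
          by_cases hk : tc = k <;> simp [hk] <;> split_ifs <;> simp_all <;> omega
      · rw [show pvM ((tc, best) :: q :: L) k =
            pvM ((tc, if q.2 > best then q.2 else best) :: L) k from ?_] at hh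
        · exact hh
        · simp only [pvM, List.foldl_cons, hq]
          by_cases hk : tc = k <;> simp [hk] <;> split_ifs <;> simp_all <;> omega
    · rw [if_neg hq]
      have htcq : tc < q.1 := lt_of_le_of_ne (h q (by simp)) (fun hh => hq hh.symm)
      constructor
      · intro hh
        rcases List.mem_cons.mp hh with heq | hmem
        · -- (k, v) = (tc, best)
          have hk : k = tc := congrArg Prod.fst heq
          have hv : v = best := congrArg Prod.snd heq
          subst hk; subst hv
          simp only [pvM, List.foldl_cons]
          exact pvM_skip k (q :: L) _ (by
            intro s hs
            rcases List.mem_cons.mp hs with rfl | hs'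
            · omega
            · have := hp.1 s hs'; omega)
        · have := (ih q.1 q.2 hp.1 hp.2 k v).mp hmem
          have hkge : q.1 ≤ k := by
            have := pvGmGo_ge L q.1 q.2 hp.1 hp.2 (k, v) hmem
            simpa using this
          have hkne : tc ≠ k := by omega
          simp only [pvM, List.foldl_cons, if_neg hkne] at this ⊢
          exact this
      · intro hh
        by_cases hk : tc = k
        · subst hk
          have : pvM ((tc, best) :: q :: L) tc = some best := by
            simp only [pvM, List.foldl_cons]
            exact pvM_skip tc (q :: L) _ (by
              intro s hs
              rcases List.mem_cons.mp hs with rfl | hs'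
              · omega
              · have := hp.1 s hs'; omega)
          rw [this] at hh
          exact List.mem_cons.mpr (Or.inl (by simp at hh; simp [hh]))
        · have : pvM ((tc, best) :: q :: L) k = pvM ((q.1, q.2) :: L) k := by
            simp only [pvM, List.foldl_cons, if_neg hk]
          rw [this] at hh
          exact List.mem_cons.mpr (Or.inr ((ih q.1 q.2 hp.1 hp.2 k v).mpr hh))

theorem pv_unique (l1 l2 : List (Int × Int))
    (h1 : l1.Pairwise (fun a b : Int × Int => a.1 < b.1))
    (h2 : l2.Pairwise (fun a b : Int × Int => a.1 < b.1))
    (hm : ∀ p : Int × Int, p ∈ l1 ↔ p ∈ l2) : l1 = l2 := by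
  have hn1 : l1.Nodup := h1.imp (fun {a b} h => by intro hh; rw [hh] at h; omega)
  have hn2 : l2.Nodup := h2.imp (fun {a b} h => by intro hh; rw [hh] at h; omega)
  have hperm : l1.Perm l2 := (List.perm_ext_iff_of_nodup hn1 hn2).mpr hm
  exact hperm.eq_of_pairwise (fun a b _ _ hab hba => by omega) h1 h2

theorem pv_main (token_counts peak_bytes : List Int) :
    build_activation_interpolator_py token_counts peak_bytes
      = build_activation_interpolator_py_alt token_counts peak_bytes := by
  set pairs := List.zip token_counts peak_bytes with hpairs
  -- merged invariant
  have hInv0 : pvInv PySem.Dict.empty [] := by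
    refine ⟨PySem.Dict.nodup_keys_empty, ?_⟩
    intro k v
    simp [PySem.Dict.empty, pvM]
  have hInv := pvA_fold pairs PySem.Dict.empty [] hInv0
  rw [List.nil_append] at hInv
  set merged : PySem.Dict Int Int :=
    pairs.foldl
      (fun d q =>
        match PySem.Dict.get? d q.1 with
        | none => PySem.Dict.insert d q.1 q.2
        | some v => if q.2 > v then PySem.Dict.insert d q.1 q.2 else d)
      PySem.Dict.empty with hmerged
  -- the sorted items list S
  set S := PySem.List.sorted2 merged.items Prod.fst Prod.snd with hS
  have hSperm : S.Perm merged.items := PySem.List.sorted2_perm merged.items Prod.fst Prod.snd false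
  have hSnodup : (S.map Prod.fst).Nodup := (hSperm.map Prod.fst).nodup_iff.mpr hInv.1
  have hSle : S.Pairwise (fun a b => a.1 ≤ b.1) := pv_sorted2_pairwise merged.items
  have hSlt : S.Pairwise (fun a b : Int × Int => a.1 < b.1) := by
    have hne : S.Pairwise (fun a b : Int × Int => a.1 ≠ b.1) :=
      (List.pairwise_map.mp hSnodup)
    exact (hSle.and hne).imp (fun {a b} h => lt_of_le_of_ne h.1 h.2)
  have hSmem : ∀ k v : Int, ((k, v) ∈ S ↔ pvM pairs k = some v) := by
    intro k v
    rw [hSperm.mem_iff]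
    exact hInv.2 k v
  -- A's output is S
  have hAout : build_activation_interpolator_py token_counts peak_bytes = S := by
    show ((PySem.List.sorted2 merged.items Prod.fst Prod.snd).foldl
      (fun (d : PySem.Dict Int Int) q => PySem.Dict.insert d q.1 q.2) PySem.Dict.empty).items = S
    rw [← hS]
    have := PySem.Dict.items_foldl_insert_fresh S Prod.fst Prod.snd PySem.Dict.empty
      (fun a _ => PySem.Dict.contains_empty (ν := Int) a.1) (by simpa using hSnodup)
    simpa [PySem.Dict.empty] using this
  -- B's side
  set T := PySem.List.sorted2 pairs Prod.fst Prod.snd with hT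
  have hTperm : T.Perm pairs := PySem.List.sorted2_perm pairs Prod.fst Prod.snd false
  have hTle : T.Pairwise (fun a b => a.1 ≤ b.1) := pv_sorted2_pairwise pairs
  rw [hAout]
  show S = build_activation_interpolator_py_alt token_counts peak_bytes
  cases hTc : T with
  | nil =>
    have hpnil : pairs = [] := (hTc ▸ hTperm).nil_eq.symm
    have : S = [] := by
      rw [hS, hmerged, hpnil]
      rfl
    rw [this]
    show ([] : List (Int × Int)) = build_activation_interpolator_py_alt token_counts peak_bytes
    unfold build_activation_interpolator_py_alt
    rw [← hpairs, ← hT, hTc]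
  | cons q rest =>
    have hTle' := hTc ▸ hTle
    rw [List.pairwise_cons] at hTle'
    have hB : build_activation_interpolator_py_alt token_counts peak_bytes = pvGmGo q.1 q.2 rest := by
      unfold build_activation_interpolator_py_alt
      rw [← hpairs, ← hT, hTc]
    rw [hB]
    refine pv_unique S (pvGmGo q.1 q.2 rest) hSlt
      (pvGmGo_pairwise rest q.1 q.2 hTle'.1 hTle'.2) ?_
    rintro ⟨k, v⟩
    rw [hSmem k v, pvGmGo_mem rest q.1 q.2 hTle'.1 hTle'.2 k v]
    have : ((q.1, q.2) :: rest) = T := by rw [hTc]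
    rw [this]
    rw [pvM_perm hTperm k]

-- ===== VERDICT (by name: the statement is the Claim_ definition above) =====
theorem build_activation_interpolator_py_spec : Claim_equal_build_activation_interpolator_py := by
  intro token_counts peak_bytes _
  unfold Spec_build_activation_interpolator_py
  exact pv_main token_counts peak_bytes
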